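-- pv_equiv track=rewrite | github.com/mitul-intellial/mitul_joshi_ai_assessment | bom_comparison_tool/core/parsers.py | _normalize_header
-- ===== SOURCE A (Python) =====
-- from typing import List, Dict, Optional, Tuple, Any
--
-- STD_KEYS = {
--     "MPN": "MPN",
--     "QUANTITY": "Quantity",
--     "REFDES": "RefDes",
--     "DESCRIPTION": "Description",
-- }
--
-- COLUMN_ALIASES = {
--     "MPN": ["mpn", "part number", "manufacturer part number", "mfg part number"],
--     "QUANTITY": ["quantity", "qty", "quant"],
--     "REFDES": ["refdes", "reference designator", "designator", "ref des"],
--     "DESCRIPTION": ["description", "desc"],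
-- }
--
-- def _normalize_header(header: List[str]) -> Dict[str, str]:
--     """Converts a raw header list to a standardized dictionary."""
--     normalized = {}
--     for column in header:
--         column_clean = str(column).lower().strip()
--         for std_key, aliases in COLUMN_ALIASES.items():
--             if column_clean in aliases:
--                 normalized[column] = STD_KEYS[std_key]
--                 break
--     return normalized
-- ===== SOURCE B (Python) =====
-- # Idiomatic: one flattened alias->standard-name dict built once; single lookup per column.
-- STD_KEYS = {
--     "MPN": "MPN",
--     "QUANTITY": "Quantity",
--     "REFDES": "RefDes",
--     "DESCRIPTION": "Description",
-- }
--
-- COLUMN_ALIASES = {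
--     "MPN": ["mpn", "part number", "manufacturer part number", "mfg part number"],
--     "QUANTITY": ["quantity", "qty", "quant"],
--     "REFDES": ["refdes", "reference designator", "designator", "ref des"],
--     "DESCRIPTION": ["description", "desc"],
-- }
--
-- _REVERSE = {
--     alias: STD_KEYS[std_key]
--     for std_key, aliases in COLUMN_ALIASES.items()
--     for alias in aliases
-- }
--
-- def _normalize_header(header):
--     """Converts a raw header list to a standardized dictionary."""
--     normalized = {}
--     for column in header:
--         std = _REVERSE.get(str(column).lower().strip())
--         if std is not None:
--             normalized[column] = std
--     return normalized
-- ===== Notes on version B (the rewrite author's own statement) =====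
-- stated objective: faster
-- what changed: Replaces the per-column inner scan over COLUMN_ALIASES alias lists (with break) by a reverse dict alias->standard name built once at module load, so each column is normalized by a single hash lookup.
import Mathlib
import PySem

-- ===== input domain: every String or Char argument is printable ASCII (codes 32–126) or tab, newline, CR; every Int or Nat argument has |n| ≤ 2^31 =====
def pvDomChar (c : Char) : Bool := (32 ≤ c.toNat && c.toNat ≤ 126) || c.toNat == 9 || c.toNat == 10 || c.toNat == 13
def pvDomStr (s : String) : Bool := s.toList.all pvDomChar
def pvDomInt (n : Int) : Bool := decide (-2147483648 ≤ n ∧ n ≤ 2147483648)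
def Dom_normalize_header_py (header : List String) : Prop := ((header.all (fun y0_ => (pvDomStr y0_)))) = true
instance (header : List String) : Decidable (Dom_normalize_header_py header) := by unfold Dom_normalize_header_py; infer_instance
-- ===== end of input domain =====

-- B replaces A's per-column inner scan over COLUMN_ALIASES (with break) by one flattened
-- alias->standard-name dict built once, so each column needs a single lookup (idiomatic).

-- ===== PORT A =====
-- STD_KEYS and COLUMN_ALIASES, as in the Python module
def pvStdKeys : PySem.Dict String String :=
  PySem.Dict.ofList [("MPN", "MPN"), ("QUANTITY", "Quantity"), ("REFDES", "RefDes"), ("DESCRIPTION", "Description")]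

def pvColumnAliases : List (String × List String) :=
  [("MPN", ["mpn", "part number", "manufacturer part number", "mfg part number"]),
   ("QUANTITY", ["quantity", "qty", "quant"]),
   ("REFDES", ["refdes", "reference designator", "designator", "ref des"]),
   ("DESCRIPTION", ["description", "desc"])]

-- the inner 'for std_key, aliases in COLUMN_ALIASES.items(): if column_clean in aliases: … break'
def pvFindStd : List (String × List String) → String → Option String
  | [], _ => none
  | (std_key, aliases) :: rest, clean =>
      if clean ∈ aliases then some std_key else pvFindStd rest clean

def normalize_header_py (header : List String) : List (String × String) :=
  (header.foldl (fun normalized column =>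
      let column_clean := PySem.Str.strip (PySem.Str.lower column)
      match pvFindStd pvColumnAliases column_clean with
      | some std_key => normalized.insert column (pvStdKeys.getD std_key "")  -- STD_KEYS[std_key]; std_key is always a key of STD_KEYS
      | none => normalized)
    PySem.Dict.empty).items

-- ===== PORT B =====
-- _REVERSE = {alias: STD_KEYS[std_key] for std_key, aliases in COLUMN_ALIASES.items() for alias in aliases}
def pvReverse : PySem.Dict String String :=
  pvColumnAliases.foldl (fun d p =>
    p.2.foldl (fun d al => d.insert al (pvStdKeys.getD p.1 "")) d) PySem.Dict.empty

def normalize_header_py_alt (header : List String) : List (String × String) :=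
  (header.foldl (fun normalized column =>
      match pvReverse.get? (PySem.Str.strip (PySem.Str.lower column)) with
      | some std => normalized.insert column std
      | none => normalized)
    PySem.Dict.empty).items

-- ===== PRECONDITION & SPEC =====
def Spec_normalize_header_py (header : List String) (out : List (String × String)) : Prop := out = normalize_header_py_alt header
instance (header : List String) (out : List (String × String)) : Decidable (Spec_normalize_header_py header out) := by unfold Spec_normalize_header_py; infer_instance

-- ===== CLAIM (what is proved, stated in full; the proofs are below) =====
def Claim_equal_normalize_header_py : Prop := ∀ (header : List String), Dom_normalize_header_py header → Spec_normalize_header_py header (normalize_header_py header)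

-- ===== LEMMAS AND PROOFS =====

-- the flattened reverse dict, computed out: _REVERSE as a literal
set_option maxHeartbeats 2000000 in
theorem pvReverse_eq : pvReverse = PySem.Dict.mk
    [("mpn", "MPN"), ("part number", "MPN"), ("manufacturer part number", "MPN"),
     ("mfg part number", "MPN"), ("quantity", "Quantity"), ("qty", "Quantity"),
     ("quant", "Quantity"), ("refdes", "RefDes"), ("reference designator", "RefDes"),
     ("designator", "RefDes"), ("ref des", "RefDes"), ("description", "Description"),
     ("desc", "Description")] := by decide

-- A's alias-list scan agrees with B's lookup in the flattened reverse dict, for every string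
theorem pvFindStd_eq_reverse (s : String) :
    (match pvFindStd pvColumnAliases s with
     | some std_key => some (pvStdKeys.getD std_key "")
     | none => none) = pvReverse.get? s := by
  rw [pvReverse_eq]
  by_cases hm : s ∈ ["mpn", "part number", "manufacturer part number", "mfg part number",
      "quantity", "qty", "quant", "refdes", "reference designator", "designator", "ref des",
      "description", "desc"]
  · fin_cases hm <;> decide
  · simp only [List.mem_cons, List.not_mem_nil, or_false, not_or] at hm
    obtain ⟨h1, h2, h3, h4, h5, h6, h7, h8, h9, h10, h11, h12, h13⟩ := hm
    simp [pvFindStd, pvColumnAliases, PySem.Dict.get?,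
      h1, h2, h3, h4, h5, h6, h7, h8, h9, h10, h11, h12, h13, Ne.symm h1, Ne.symm h2,
      Ne.symm h3, Ne.symm h4, Ne.symm h5, Ne.symm h6, Ne.symm h7, Ne.symm h8, Ne.symm h9,
      Ne.symm h10, Ne.symm h11, Ne.symm h12, Ne.symm h13]

-- ===== VERDICT (by name: the statement is the Claim_ definition above) =====
-- the two per-column loop bodies agree
theorem pvStep_eq (normalized : PySem.Dict String String) (column : String) :
    (let column_clean := PySem.Str.strip (PySem.Str.lower column)
     match pvFindStd pvColumnAliases column_clean with
     | some std_key => normalized.insert column (pvStdKeys.getD std_key "")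
     | none => normalized)
    = match pvReverse.get? (PySem.Str.strip (PySem.Str.lower column)) with
      | some std => normalized.insert column std
      | none => normalized := by
  rw [← pvFindStd_eq_reverse (PySem.Str.strip (PySem.Str.lower column))]
  cases h : pvFindStd pvColumnAliases (PySem.Str.strip (PySem.Str.lower column)) <;>
    simp only [h]

theorem normalize_header_py_spec : Claim_equal_normalize_header_py := by
  intro header _
  show normalize_header_py header = normalize_header_py_alt header
  unfold normalize_header_py normalize_header_py_alt
  rw [funext fun normalized => funext fun column => pvStep_eq normalized column]
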